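-- pv_equiv track=rewrite | github.com/larynx95/rosalind | src/ba06/ba06i_graph_to_genome/ba06i_01.py | graph_to_genome2
-- ===== SOURCE A (Python) =====
-- def cycle_to_chromosome(nodes):
--     """
--     [int] -> [str]
--     return a list of strings (signed integers)
--     >>> cycle_to_chromosome([1,2,4,3,6,5,7,8])
--         (+1 -2 -3 +4)
--     """
--     chromosome = []
--     for j in range(0, len(nodes) // 2):
--         if nodes[2*j] < nodes[2*j + 1]:
--             chromosome.append('+' + str(nodes[2*j + 1] // 2))
--         else:
--             chromosome.append('-' + str(nodes[2*j] // 2))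
--     return chromosome
--
-- def graph_to_genome2(genome_graph):
--     """
--     [(int,int)] -> str
--     >>> graph_to_genome2([(2,4),(3,6),(5,1),(7,9),(10,12),(11,8)])
--         (+1 -2 -3)(-4 +5 -6)
--     >>> graph_to_genome2([(2, 4), (3, 8), (7, 5), (6, 1)])
--         (+1 -2 -4 +3)
--     """
--     p = ''
--     nodes = []
--     for edge in genome_graph:
--         adj_left = edge[0] + 1 if edge[0] % 2 == 1 else edge[0] - 1
--         nodes += [adj_left, edge[0]]
--         if nodes[0] == edge[1]:
--             p += '(' + ' '.join(cycle_to_chromosome(nodes)) + ')'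
--             nodes = []
--     return p
-- ===== SOURCE B (Python) =====
-- def graph_to_genome2(genome_graph):
--     p = ''
--     tokens = []
--     start = None
--     for a, b in genome_graph:
--         adj = a + 1 if a % 2 == 1 else a - 1
--         if not tokens:
--             start = adj
--         tokens.append('+' + str(a // 2) if adj < a else '-' + str(adj // 2))
--         if b == start:
--             p += '(' + ' '.join(tokens) + ')'
--             tokens = []
--     return p
-- ===== Notes on version B (the rewrite author's own statement) =====
-- stated objective: simpler
-- what changed: B emits each signed-gene token directly from the edge it comes from and tracks only the current chromosome's start node, eliminating A's accumulated `nodes` list and cycle_to_chromosome's separate index-based re-pairing pass over it.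
import Mathlib
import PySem

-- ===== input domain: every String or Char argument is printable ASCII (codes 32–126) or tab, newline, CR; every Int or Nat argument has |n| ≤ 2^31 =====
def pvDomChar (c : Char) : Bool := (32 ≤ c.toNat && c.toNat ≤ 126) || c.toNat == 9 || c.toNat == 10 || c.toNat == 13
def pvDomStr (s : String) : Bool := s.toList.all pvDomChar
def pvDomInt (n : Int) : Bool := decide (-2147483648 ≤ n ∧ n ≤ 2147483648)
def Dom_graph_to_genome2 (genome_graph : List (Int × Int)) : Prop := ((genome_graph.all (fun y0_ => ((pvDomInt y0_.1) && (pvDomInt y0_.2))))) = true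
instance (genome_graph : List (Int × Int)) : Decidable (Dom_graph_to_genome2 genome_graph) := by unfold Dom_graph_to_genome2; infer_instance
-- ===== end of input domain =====

-- B inlines the per-edge sign token and tracks the chromosome's start node, removing A's
-- `nodes` accumulation and cycle_to_chromosome's separate re-pairing pass (objective: simpler).

-- ===== PORT A =====
-- indices 2*j and 2*j+1 are always in range in A's uses (j < len(nodes)//2), so pyGetD's default is never taken
def cycle_to_chromosome (nodes : List Int) : List String :=
  (PySem.List.pyRange 0 (PySem.Int.floordiv ((nodes.length : Int)) 2) 1).foldl
    (fun chromosome j =>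
      if PySem.List.pyGetD nodes (2*j) 0 < PySem.List.pyGetD nodes (2*j+1) 0 then
        chromosome ++ ["+" ++ PySem.Int.toStr (PySem.Int.floordiv (PySem.List.pyGetD nodes (2*j+1) 0) 2)]
      else
        chromosome ++ ["-" ++ PySem.Int.toStr (PySem.Int.floordiv (PySem.List.pyGetD nodes (2*j) 0) 2)]) []

def graph_to_genome2 (genome_graph : List (Int × Int)) : String :=
  (genome_graph.foldl (fun (s : String × List Int) edge =>
      let adj_left := if PySem.Int.mod edge.1 2 = 1 then edge.1 + 1 else edge.1 - 1
      let nodes := s.2 ++ [adj_left, edge.1]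
      if PySem.List.pyGetD nodes 0 0 = edge.2 then
        (s.1 ++ "(" ++ PySem.Str.join " " (cycle_to_chromosome nodes) ++ ")", [])
      else
        (s.1, nodes)) ("", [])).1

-- ===== PORT B =====
def graph_to_genome2_alt (genome_graph : List (Int × Int)) : String :=
  (genome_graph.foldl (fun (s : String × List String × Option Int) e =>
      let adj := if PySem.Int.mod e.1 2 = 1 then e.1 + 1 else e.1 - 1
      let start := if s.2.1 = [] then some adj else s.2.2
      let tokens := s.2.1 ++
        [if adj < e.1 then "+" ++ PySem.Int.toStr (PySem.Int.floordiv e.1 2)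
         else "-" ++ PySem.Int.toStr (PySem.Int.floordiv adj 2)]
      if some e.2 = start then
        (s.1 ++ "(" ++ PySem.Str.join " " tokens ++ ")", [], start)
      else
        (s.1, tokens, start)) ("", [], none)).1

-- ===== PRECONDITION & SPEC =====
def Spec_graph_to_genome2 (genome_graph : List (Int × Int)) (out : String) : Prop := out = graph_to_genome2_alt genome_graph
instance (genome_graph : List (Int × Int)) (out : String) : Decidable (Spec_graph_to_genome2 genome_graph out) := by unfold Spec_graph_to_genome2; infer_instance

-- ===== CLAIM (what is proved, stated in full; the proofs are below) =====
def Claim_equal_graph_to_genome2 : Prop := ∀ (genome_graph : List (Int × Int)), Dom_graph_to_genome2 genome_graph → Spec_graph_to_genome2 genome_graph (graph_to_genome2 genome_graph)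

-- ===== LEMMAS AND PROOFS =====

-- the loop bodies of the two ports, named so the induction can step them
def stepA : String × List Int → Int × Int → String × List Int := fun s edge =>
  let adj_left := if PySem.Int.mod edge.1 2 = 1 then edge.1 + 1 else edge.1 - 1
  let nodes := s.2 ++ [adj_left, edge.1]
  if PySem.List.pyGetD nodes 0 0 = edge.2 then
    (s.1 ++ "(" ++ PySem.Str.join " " (cycle_to_chromosome nodes) ++ ")", [])
  else
    (s.1, nodes)

def stepB : String × List String × Option Int → Int × Int → String × List String × Option Int := fun s e =>
  let adj := if PySem.Int.mod e.1 2 = 1 then e.1 + 1 else e.1 - 1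
  let start := if s.2.1 = [] then some adj else s.2.2
  let tokens := s.2.1 ++
    [if adj < e.1 then "+" ++ PySem.Int.toStr (PySem.Int.floordiv e.1 2)
     else "-" ++ PySem.Int.toStr (PySem.Int.floordiv adj 2)]
  if some e.2 = start then
    (s.1 ++ "(" ++ PySem.Str.join " " tokens ++ ")", [], start)
  else
    (s.1, tokens, start)

lemma ctc_nil : cycle_to_chromosome [] = [] := by
  simp [cycle_to_chromosome, PySem.Int.floordiv, PySem.List.pyRange]

lemma getD_app_left (nodes ex : List Int) (i : Int) (h0 : 0 ≤ i) (hlt : i < nodes.length) :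
    PySem.List.pyGetD (nodes ++ ex) i 0 = PySem.List.pyGetD nodes i 0 := by
  rw [PySem.List.pyGetD_eq_getElem (nodes ++ ex) 0 h0 (by simp; omega),
      PySem.List.pyGetD_eq_getElem nodes 0 h0 hlt]
  exact List.getElem_append_left (by omega)

lemma ctc_append (nodes : List Int) (x y : Int) (n : Nat) (h : nodes.length = 2 * n) :
    cycle_to_chromosome (nodes ++ [x, y]) =
      cycle_to_chromosome nodes ++
        [if x < y then "+" ++ PySem.Int.toStr (PySem.Int.floordiv y 2)
         else "-" ++ PySem.Int.toStr (PySem.Int.floordiv x 2)] := by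
  unfold cycle_to_chromosome
  have h2c : ((2:Int)) = ((2:Nat):Int) := by norm_num
  have hl1 : ((nodes ++ [x,y]).length : Int) = ((2*n+2 : Nat) : Int) := by simp [h]
  have hl2 : ((nodes.length : Int)) = ((2*n : Nat) : Int) := by simp [h]
  have fd1 : PySem.Int.floordiv ((2*n+2 : Nat):Int) 2 = ((n+1 : Nat):Int) := by
    rw [h2c, PySem.Int.floordiv_natCast]; congr 1; omega
  have fd2 : PySem.Int.floordiv ((2*n : Nat):Int) 2 = ((n : Nat):Int) := by
    rw [h2c, PySem.Int.floordiv_natCast]; congr 1; omega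
  rw [hl1, hl2, fd1, fd2]
  have hr : PySem.List.pyRange 0 ((n+1 : Nat) : Int) 1
      = PySem.List.pyRange 0 ((n:Nat) : Int) 1 ++ [((n:Nat):Int)] := by
    push_cast
    exact PySem.List.pyRange_one_succ_right (by positivity)
  rw [hr, List.foldl_append]
  rw [PySem.List.foldl_congr_mem _ _
    (fun chromosome j =>
      if PySem.List.pyGetD nodes (2*j) 0 < PySem.List.pyGetD nodes (2*j+1) 0 then
        chromosome ++ ["+" ++ PySem.Int.toStr (PySem.Int.floordiv (PySem.List.pyGetD nodes (2*j+1) 0) 2)]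
      else
        chromosome ++ ["-" ++ PySem.Int.toStr (PySem.Int.floordiv (PySem.List.pyGetD nodes (2*j) 0) 2)]) []
    (by
      intro acc j hj
      rw [PySem.List.mem_pyRange_one] at hj
      rw [getD_app_left nodes [x,y] (2*j) (by omega) (by omega),
          getD_app_left nodes [x,y] (2*j+1) (by omega) (by omega)])]
  have hx : PySem.List.pyGetD (nodes ++ [x,y]) (2*((n:Nat):Int)) 0 = x := by
    rw [PySem.List.pyGetD_eq_getElem (nodes ++ [x,y]) 0 (by positivity) (by simp [h]; try omega)]
    have ht : (2*((n:Nat):Int)).toNat = nodes.length := by omega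
    simp [ht]
  have hy : PySem.List.pyGetD (nodes ++ [x,y]) (2*((n:Nat):Int)+1) 0 = y := by
    rw [PySem.List.pyGetD_eq_getElem (nodes ++ [x,y]) 0 (by positivity) (by simp [h]; try omega)]
    have ht : (2*((n:Nat):Int)+1).toNat = nodes.length + 1 := by omega
    simp [ht, h]
  simp [List.foldl, hx, hy]
  split <;> rfl

lemma loop_eq (l : List (Int × Int)) (p : String) (nodes : List Int) (tokens : List String)
    (start : Option Int)
    (h1 : cycle_to_chromosome nodes = tokens)
    (h2 : nodes.length = 2 * tokens.length)
    (h4 : ∀ hne : nodes ≠ [], start = some (nodes.head hne)) :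
    (l.foldl stepA (p, nodes)).1 = (l.foldl stepB (p, tokens, start)).1 := by
  induction l generalizing p nodes tokens start with
  | nil => rfl
  | cons e l ih =>
    obtain ⟨a, b⟩ := e
    rw [List.foldl_cons, List.foldl_cons]
    cases nodes with
    | nil =>
      have htok : tokens = [] := by
        cases tokens with
        | nil => rfl
        | cons t ts => simp at h2
      subst htok
      by_cases hc : (if PySem.Int.mod a 2 = 1 then a + 1 else a - 1) = b
      · have hA : stepA (p, ([] : List Int)) (a, b)
            = (p ++ "(" ++ PySem.Str.join " "
                (cycle_to_chromosome ([(if PySem.Int.mod a 2 = 1 then a + 1 else a - 1), a])) ++ ")", []) := by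
          simp only [stepA, List.nil_append]
          rw [PySem.List.pyGetD_zero_cons, if_pos hc]
        have hB : stepB (p, ([] : List String), start) (a, b)
            = (p ++ "(" ++ PySem.Str.join " "
                ([(if (if PySem.Int.mod a 2 = 1 then a + 1 else a - 1) < a then
                    "+" ++ PySem.Int.toStr (PySem.Int.floordiv a 2)
                  else "-" ++ PySem.Int.toStr (PySem.Int.floordiv (if PySem.Int.mod a 2 = 1 then a + 1 else a - 1) 2))]) ++ ")",
               [], some (if PySem.Int.mod a 2 = 1 then a + 1 else a - 1)) := by
          simp only [stepB, List.nil_append]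
          simp only [if_true]
          rw [if_pos (by rw [hc])]
        rw [hA, hB]
        have hctc : cycle_to_chromosome ([(if PySem.Int.mod a 2 = 1 then a + 1 else a - 1), a])
            = [(if (if PySem.Int.mod a 2 = 1 then a + 1 else a - 1) < a then
                    "+" ++ PySem.Int.toStr (PySem.Int.floordiv a 2)
                  else "-" ++ PySem.Int.toStr (PySem.Int.floordiv (if PySem.Int.mod a 2 = 1 then a + 1 else a - 1) 2))] := by
          have := ctc_append [] (if PySem.Int.mod a 2 = 1 then a + 1 else a - 1) a 0 rfl
          simpa [ctc_nil] using this
        rw [hctc]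
        exact ih _ [] [] _ ctc_nil rfl (by intro hne; exact absurd rfl hne)
      · have hA : stepA (p, ([] : List Int)) (a, b)
            = (p, [(if PySem.Int.mod a 2 = 1 then a + 1 else a - 1), a]) := by
          simp only [stepA, List.nil_append]
          rw [PySem.List.pyGetD_zero_cons, if_neg hc]
        have hB : stepB (p, ([] : List String), start) (a, b)
            = (p, [(if (if PySem.Int.mod a 2 = 1 then a + 1 else a - 1) < a then
                    "+" ++ PySem.Int.toStr (PySem.Int.floordiv a 2)
                  else "-" ++ PySem.Int.toStr (PySem.Int.floordiv (if PySem.Int.mod a 2 = 1 then a + 1 else a - 1) 2))],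
               some (if PySem.Int.mod a 2 = 1 then a + 1 else a - 1)) := by
          simp only [stepB, List.nil_append]
          simp only [if_true]
          rw [if_neg (by intro hcon; exact hc (by injection hcon with h'; omega))]
        rw [hA, hB]
        apply ih
        · have := ctc_append [] (if PySem.Int.mod a 2 = 1 then a + 1 else a - 1) a 0 rfl
          simpa [ctc_nil] using this
        · rfl
        · intro _; rfl
    | cons v rest =>
      have htne : tokens ≠ [] := by
        intro h; subst h; simp at h2
      have hst : start = some v := h4 (by simp)
      by_cases hc : v = b
      · have hA : stepA (p, v :: rest) (a, b)
            = (p ++ "(" ++ PySem.Str.join " "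
                (cycle_to_chromosome ((v :: rest) ++ [(if PySem.Int.mod a 2 = 1 then a + 1 else a - 1), a])) ++ ")", []) := by
          simp only [stepA, List.cons_append]
          rw [PySem.List.pyGetD_zero_cons, if_pos hc]
        have hB : stepB (p, tokens, start) (a, b)
            = (p ++ "(" ++ PySem.Str.join " "
                (tokens ++ [(if (if PySem.Int.mod a 2 = 1 then a + 1 else a - 1) < a then
                    "+" ++ PySem.Int.toStr (PySem.Int.floordiv a 2)
                  else "-" ++ PySem.Int.toStr (PySem.Int.floordiv (if PySem.Int.mod a 2 = 1 then a + 1 else a - 1) 2))]) ++ ")",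
               [], start) := by
          simp only [stepB, if_neg htne]
          rw [if_pos (by rw [hst, hc])]
        rw [hA, hB]
        have hctc := ctc_append (v :: rest) (if PySem.Int.mod a 2 = 1 then a + 1 else a - 1) a tokens.length h2
        rw [h1] at hctc
        rw [hctc]
        exact ih _ [] [] _ ctc_nil rfl (by intro hne; exact absurd rfl hne)
      · have hA : stepA (p, v :: rest) (a, b)
            = (p, (v :: rest) ++ [(if PySem.Int.mod a 2 = 1 then a + 1 else a - 1), a]) := by
          simp only [stepA, List.cons_append]
          rw [PySem.List.pyGetD_zero_cons, if_neg hc]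
        have hB : stepB (p, tokens, start) (a, b)
            = (p, tokens ++ [(if (if PySem.Int.mod a 2 = 1 then a + 1 else a - 1) < a then
                    "+" ++ PySem.Int.toStr (PySem.Int.floordiv a 2)
                  else "-" ++ PySem.Int.toStr (PySem.Int.floordiv (if PySem.Int.mod a 2 = 1 then a + 1 else a - 1) 2))],
               start) := by
          simp only [stepB, if_neg htne]
          rw [if_neg (by rw [hst]; intro hcon; exact hc (by injection hcon with h'; omega))]
        rw [hA, hB]
        apply ih
        · have hctc := ctc_append (v :: rest) (if PySem.Int.mod a 2 = 1 then a + 1 else a - 1) a tokens.length h2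
          rw [h1] at hctc
          exact hctc
        · simp only [List.length_cons] at h2
          simp only [List.length_append, List.length_cons, List.length_nil]
          omega
        · intro hne
          rw [hst]
          congr 1

-- ===== VERDICT (by name: the statement is the Claim_ definition above) =====
theorem graph_to_genome2_spec : Claim_equal_graph_to_genome2 := by
  intro g _
  unfold Spec_graph_to_genome2 graph_to_genome2 graph_to_genome2_alt
  exact loop_eq g "" [] [] none ctc_nil rfl (by intro hne; exact absurd rfl hne)
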